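-- pv_equiv track=rewrite | github.com/gypgypgyp/PromoSearchMCP | mcp_server/tools/optimize_ad_slots.py | _calculate_insertion_positions
-- ===== SOURCE A (Python) =====
-- from typing import Dict, List, Any
--
-- def _calculate_insertion_positions(num_results: int, num_ads: int) -> List[int]:
--     """
--     Calculate optimal positions to insert ads.
--
--     Args:
--         num_results: Total number of organic results
--         num_ads: Number of ads to insert
--
--     Returns:
--         List of positions (1-indexed) where ads should be inserted
--     """
--     if num_ads == 0 or num_results < 2:
--         return []
--
--     positions = []
--
--     if num_results <= 5:
--         # For short result lists, insert after position 2
--         if num_ads >= 1: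
--             positions.append(2)
--         if num_ads >= 2 and num_results >= 4:
--             positions.append(4)
--     else:
--         # For longer lists, distribute more evenly
--         # Start after position 2, then every 3-4 positions
--         positions.append(2)
--
--         if num_ads >= 2:
--             positions.append(5)
--
--         if num_ads >= 3 and num_results >= 9:
--             positions.append(8)
--
--     # Ensure positions don't exceed result count
--     positions = [pos for pos in positions if pos < num_results]
--
--     return positions[:num_ads]
-- ===== SOURCE B (Python) =====
-- def _calculate_insertion_positions(num_results: int, num_ads: int):
--     if num_ads <= 0 or num_results < 2:
--         return []
--     step, cap = (2, 2) if num_results <= 5 else (3, 3)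
--     limit = min(num_ads, cap)
--     out = []
--     p = 2
--     while len(out) < limit and p < num_results:
--         out.append(p)
--         p += step
--     return out
-- ===== Notes on version B (the rewrite author's own statement) =====
-- stated objective: alternative
-- what changed: Replaces the hardcoded candidate positions, filter and slice with an arithmetic-progression loop: start at 2, step 2 (short lists) or 3 (long lists), emitting positions while below num_results and under a slot cap of min(num_ads, 2 or 3).
import Mathlib
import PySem

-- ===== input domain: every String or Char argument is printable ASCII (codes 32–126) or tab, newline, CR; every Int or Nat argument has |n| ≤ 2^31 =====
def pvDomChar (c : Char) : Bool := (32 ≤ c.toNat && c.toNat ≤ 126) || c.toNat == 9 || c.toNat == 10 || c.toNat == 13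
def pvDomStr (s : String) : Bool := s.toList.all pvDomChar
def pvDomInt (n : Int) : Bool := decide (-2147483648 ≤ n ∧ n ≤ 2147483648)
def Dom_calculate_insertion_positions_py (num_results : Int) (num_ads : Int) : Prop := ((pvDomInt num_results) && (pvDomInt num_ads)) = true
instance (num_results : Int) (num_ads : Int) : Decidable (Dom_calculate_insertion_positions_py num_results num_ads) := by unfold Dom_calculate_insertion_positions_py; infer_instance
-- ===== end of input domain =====

-- B generates positions as an arithmetic progression (start 2, step 2 or 3) under a slot cap, instead of A's conditional-append cascade with filter and slice (objective: alternative).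

-- ===== PORT A =====
def calculate_insertion_positions_py (num_results : Int) (num_ads : Int) : List Int :=
  if num_ads = 0 ∨ num_results < 2 then []
  else
    let positions : List Int := []
    let positions :=
      if num_results ≤ 5 then
        let positions := if num_ads ≥ 1 then positions ++ [2] else positions
        let positions := if num_ads ≥ 2 ∧ num_results ≥ 4 then positions ++ [4] else positions
        positions
      else
        let positions := positions ++ [2]
        let positions := if num_ads ≥ 2 then positions ++ [5] else positions
        let positions := if num_ads ≥ 3 ∧ num_results ≥ 9 then positions ++ [8] else positions
        positions
    let positions := positions.filter (fun pos => decide (pos < num_results))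
    PySem.List.slice positions none (some num_ads)

-- ===== PORT B =====
-- B's while loop: emit p while fewer than `limit` emitted and p < n; counted down by `limit`.
def cipLoop (fuel : Nat) (p : Int) (step : Int) (n : Int) : List Int :=
  match fuel with
  | 0 => []
  | Nat.succ m => if p < n then p :: cipLoop m (p + step) step n else []

def calculate_insertion_positions_py_alt (num_results : Int) (num_ads : Int) : List Int :=
  if num_ads ≤ 0 ∨ num_results < 2 then []
  else
    let step : Int := if num_results ≤ 5 then 2 else 3
    let cap : Int := if num_results ≤ 5 then 2 else 3
    let limit := min num_ads cap
    cipLoop limit.toNat 2 step num_results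

-- ===== PRECONDITION & SPEC =====
def Spec_calculate_insertion_positions_py (num_results : Int) (num_ads : Int) (out : List Int) : Prop := out = calculate_insertion_positions_py_alt num_results num_ads
instance (num_results : Int) (num_ads : Int) (out : List Int) : Decidable (Spec_calculate_insertion_positions_py num_results num_ads out) := by unfold Spec_calculate_insertion_positions_py; infer_instance

-- ===== CLAIM (what is proved, stated in full; the proofs are below) =====
def Claim_equal_calculate_insertion_positions_py : Prop := ∀ (num_results : Int) (num_ads : Int), Dom_calculate_insertion_positions_py num_results num_ads → Spec_calculate_insertion_positions_py num_results num_ads (calculate_insertion_positions_py num_results num_ads)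

-- ===== LEMMAS AND PROOFS =====

lemma slice_all (xs : List Int) (b : Int) (h : (xs.length : Int) ≤ b) :
    PySem.List.slice xs none (some b) = xs := by
  have hb : 0 ≤ b := le_trans (Int.natCast_nonneg _) h
  have hs := PySem.List.slice_to_natCast xs b.toNat
  rw [Int.toNat_of_nonneg hb] at hs
  rw [hs, List.take_of_length_le (by omega)]

-- ===== VERDICT (by name: the statement is the Claim_ definition above) =====
theorem calculate_insertion_positions_py_spec : Claim_equal_calculate_insertion_positions_py := by
  intro nr na _
  unfold Spec_calculate_insertion_positions_py calculate_insertion_positions_py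
    calculate_insertion_positions_py_alt
  by_cases h2 : nr < 2
  · simp [h2]
  by_cases h0 : na ≤ 0
  · rcases eq_or_lt_of_le h0 with h0' | h0'
    · simp [← h0']
    · have hna : na ≤ -1 := by omega
      rw [if_neg (by omega : ¬(na = 0 ∨ nr < 2)), if_pos (Or.inl h0)]
      by_cases h5 : nr ≤ 5
      · simp [h5, show ¬(1 ≤ na) by omega, show ¬(2 ≤ na) by omega, PySem.List.slice]
      · simp only [h5, if_false, if_neg (show ¬(2 ≤ na) by omega),
          if_neg (show ¬(3 ≤ na ∧ 9 ≤ nr) by omega)]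
        rw [show List.filter (fun pos => decide (pos < nr)) ([] ++ [2]) = [2] by
          simp [show (2:Int) < nr by omega]]
        simp only [PySem.List.slice, PySem.List.clampIdx]
        split_ifs <;> simp_all <;> omega
  · -- na ≥ 1, nr ≥ 2
    rw [if_neg (by omega : ¬(na = 0 ∨ nr < 2)), if_neg (by omega : ¬(na ≤ 0 ∨ nr < 2))]
    by_cases h5 : nr ≤ 5
    · -- step 2, cap 2
      simp only [h5, if_true, if_pos (show 1 ≤ na by omega), List.nil_append]
      by_cases ha2 : 2 ≤ na
      · rw [show (min na 2).toNat = 2 by omega]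
        by_cases h4 : 4 ≤ nr
        · rw [if_pos (show 2 ≤ na ∧ 4 ≤ nr by omega)]
          rw [slice_all _ _ (by
            have := List.length_filter_le (fun pos => decide (pos < nr)) ([2] ++ [4]); simp at this ⊢; omega)]
          rcases (by omega : nr = 4 ∨ nr = 5) with h | h <;> subst h <;> decide
        · rw [if_neg (show ¬(2 ≤ na ∧ 4 ≤ nr) by omega)]
          rw [slice_all _ _ (by
            have := List.length_filter_le (fun pos => decide (pos < nr)) ([2] : List Int); simp at this ⊢; omega)]
          rcases (by omega : nr = 2 ∨ nr = 3) with h | h <;> subst h <;> decide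
      · have hna : na = 1 := by omega
        subst hna
        rw [if_neg (show ¬(2 ≤ (1:Int) ∧ 4 ≤ nr) by omega),
          show (min (1:Int) 2).toNat = 1 by omega]
        rw [slice_all _ _ (by
          have := List.length_filter_le (fun pos => decide (pos < nr)) ([2] : List Int); simp at this ⊢; omega)]
        by_cases h22 : (2:Int) < nr <;> simp [h22, cipLoop]
    · -- step 3, cap 3
      simp only [h5, if_false, List.nil_append]
      by_cases ha3 : 3 ≤ na
      · rw [if_pos (show 2 ≤ na by omega), show (min na 3).toNat = 3 by omega]
        by_cases h9 : 9 ≤ nr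
        · rw [if_pos (show 3 ≤ na ∧ 9 ≤ nr by omega)]
          rw [slice_all _ _ (by
            have := List.length_filter_le (fun pos => decide (pos < nr)) ([2] ++ [5] ++ [8]); simp at this ⊢; omega)]
          simp [cipLoop, show (2:Int) < nr by omega, show (5:Int) < nr by omega,
            show (8:Int) < nr by omega]
        · rw [if_neg (show ¬(3 ≤ na ∧ 9 ≤ nr) by omega)]
          rw [slice_all _ _ (by
            have := List.length_filter_le (fun pos => decide (pos < nr)) ([2] ++ [5]); simp at this ⊢; omega)]
          simp [cipLoop, show (2:Int) < nr by omega, show (5:Int) < nr by omega,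
            show ¬((8:Int) < nr) by omega]
      · rcases (by omega : na = 1 ∨ na = 2) with h | h <;> subst h
        · rw [if_neg (show ¬(2 ≤ (1:Int)) by omega),
            if_neg (show ¬(3 ≤ (1:Int) ∧ 9 ≤ nr) by omega),
            show (min (1:Int) 3).toNat = 1 by omega]
          rw [slice_all _ _ (by
            have := List.length_filter_le (fun pos => decide (pos < nr)) ([2] : List Int); simp at this ⊢; omega)]
          simp [cipLoop, show (2:Int) < nr by omega]
        · rw [if_pos (show (2:Int) ≤ 2 by omega),
            if_neg (show ¬(3 ≤ (2:Int) ∧ 9 ≤ nr) by omega),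
            show (min (2:Int) 3).toNat = 2 by omega]
          rw [slice_all _ _ (by
            have := List.length_filter_le (fun pos => decide (pos < nr)) ([2] ++ [5]); simp at this ⊢; omega)]
          simp [cipLoop, show (2:Int) < nr by omega, show (5:Int) < nr by omega]
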